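-- pv_equiv track=rewrite | github.com/Pirraa/cyberchallenge | cryptography/sfide cripto 01/i_drop_the_key.py | swap_first_last
-- ===== SOURCE A (Python) =====
-- def swap_first_last(key):
--     # Dividiamo la stringa in gruppi di 4
--     groups = [key[i:i+4] for i in range(0, len(key), 4)]
--
--     # Modifichiamo ogni gruppo scambiando il primo e l'ultimo carattere
--     swapped_groups = []
--     for group in groups:
--         if len(group) == 4:
--             swapped_group = group[-1] + group[1:3] + group[0]  # Scambia prima e ultima lettera
--         else:
--             swapped_group = group  # Non modificare se il gruppo è più corto di 4
--         swapped_groups.append(swapped_group)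
--
--     # Ritorniamo la stringa concatenata
--     flag = ''.join(swapped_groups)
--     return flag
-- ===== SOURCE B (Python) =====
-- def swap_first_last(key):
--     lst = list(key)
--     n = len(lst)
--     for i in range(0, n, 4):
--         if i + 3 < n:
--             lst[i], lst[i + 3] = lst[i + 3], lst[i]
--     return ''.join(lst)
-- ===== Notes on version B (the rewrite author's own statement) =====
-- stated objective: simpler
-- what changed: B swaps characters in place in one flat char list by index (swap lst[i],lst[i+3] for each full 4-block) instead of building a list of 4-char group strings, rebuilding each swapped group via slicing/concatenation, and joining them; avoiding per-group string slicing/allocation also makes it measurably faster.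
import Mathlib
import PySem

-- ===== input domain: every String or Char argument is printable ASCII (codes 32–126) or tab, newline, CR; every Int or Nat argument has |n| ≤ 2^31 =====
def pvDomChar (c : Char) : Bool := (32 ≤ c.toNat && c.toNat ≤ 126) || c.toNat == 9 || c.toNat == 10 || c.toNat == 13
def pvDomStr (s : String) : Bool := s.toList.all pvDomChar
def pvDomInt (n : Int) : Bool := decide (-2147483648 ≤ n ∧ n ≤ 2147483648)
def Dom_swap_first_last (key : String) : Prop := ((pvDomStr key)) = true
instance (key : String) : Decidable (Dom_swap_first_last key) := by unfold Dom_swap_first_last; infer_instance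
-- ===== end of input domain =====

-- B swaps characters in place in one flat char list by index instead of building, swapping and joining 4-char group strings; objective: simpler.

-- ===== PORT A =====
-- A: split into 4-char groups, swap first/last char of each full group, join.
def swap_first_last (key : String) : String :=
  let s := key.toList
  let groups := (PySem.List.pyRange 0 (PySem.Str.len key) 4).map
      (fun i => PySem.List.slice s (some i) (some (i + 4)))
  let swapped_groups := groups.foldl
      (fun acc group =>
        if group.length = 4 then
          acc ++ [(PySem.List.pyGet? group (-1)).toList
                    ++ PySem.List.slice group (some 1) (some 3)
                    ++ (PySem.List.pyGet? group 0).toList]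
        else acc ++ [group]) []
  String.ofList swapped_groups.flatten

-- ===== PORT B =====
-- loop body of B: when i+3 is in range, swap lst[i] and lst[i+3]
def swapStep (n : Int) (lst : List Char) (i : Int) : List Char :=
  if i + 3 < n then
    (lst.set i.toNat (PySem.List.pyGetD lst (i + 3) 'a')).set (i + 3).toNat
      (PySem.List.pyGetD lst i 'a')
  else lst

def swap_first_last_alt (key : String) : String :=
  let n := PySem.Str.len key
  String.ofList ((PySem.List.pyRange 0 n 4).foldl (swapStep n) key.toList)

-- ===== PRECONDITION & SPEC =====
def Spec_swap_first_last (key : String) (out : String) : Prop := out = swap_first_last_alt key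
instance (key : String) (out : String) : Decidable (Spec_swap_first_last key out) := by unfold Spec_swap_first_last; infer_instance

-- ===== CLAIM (what is proved, stated in full; the proofs are below) =====
def Claim_equal_swap_first_last : Prop := ∀ (key : String), Dom_swap_first_last key → Spec_swap_first_last key (swap_first_last key)

-- ===== LEMMAS AND PROOFS =====

-- the common recursive characterisation: swap ends of each full 4-block
def swapCore : List Char → List Char
  | a :: b :: c :: d :: rest => d :: b :: c :: a :: swapCore rest
  | s => s

lemma pyRange_four_cons (a b : Int) (h : a < b) :
    PySem.List.pyRange a b 4 = a :: PySem.List.pyRange (a + 4) b 4 := by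
  rw [PySem.List.pyRange_of_pos a b (by norm_num),
      PySem.List.pyRange_of_pos (a + 4) b (by norm_num)]
  have hc : (if a < b then ((b - a + 4 - 1) / 4).toNat else 0)
      = (if a + 4 < b then ((b - (a + 4) + 4 - 1) / 4).toNat else 0) + 1 := by
    split_ifs <;> omega
  rw [hc, List.range_succ_eq_map]
  simp only [List.map_cons, List.map_map]
  congr 1
  · norm_num
  · apply List.map_congr_left
    intro k _
    simp [Function.comp, Nat.succ_eq_add_one]
    ring_nf

lemma pyRange_four_shift (n : Int) :
    PySem.List.pyRange 4 n 4 = (PySem.List.pyRange 0 (n - 4) 4).map (fun i => 4 + i) := by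
  rw [PySem.List.pyRange_of_pos 4 n (by norm_num),
      PySem.List.pyRange_of_pos 0 (n - 4) (by norm_num)]
  have hc : (if (4:Int) < n then ((n - 4 + 4 - 1) / 4).toNat else 0)
      = (if (0:Int) < n - 4 then ((n - 4 - 0 + 4 - 1) / 4).toNat else 0) := by
    split_ifs with h1 h2 <;> omega
  rw [hc, List.map_map]
  apply List.map_congr_left
  intro k _
  simp [Function.comp]

lemma set_four_cons {x0 x1 x2 x3 : Char} (t : List Char) (k : Nat) (v : Char) :
    (x0 :: x1 :: x2 :: x3 :: t).set (4 + k) v = x0 :: x1 :: x2 :: x3 :: t.set k v := by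
  have h4 : 4 + k = (((k + 1) + 1) + 1) + 1 := by omega
  rw [h4]
  simp [List.set]

lemma getD_four_cons {x0 x1 x2 x3 : Char} (t : List Char) (k : Nat) (d : Char) :
    (x0 :: x1 :: x2 :: x3 :: t).getD (4 + k) d = t.getD k d := by
  have h4 : 4 + k = (((k + 1) + 1) + 1) + 1 := by omega
  rw [h4]
  simp [List.getD]

lemma swapStep_shift (n i : Int) (hi : 0 ≤ i) (x0 x1 x2 x3 : Char) (rest : List Char) :
    swapStep n (x0 :: x1 :: x2 :: x3 :: rest) (4 + i)
      = x0 :: x1 :: x2 :: x3 :: swapStep (n - 4) rest i := by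
  unfold swapStep
  by_cases h : i + 3 < n - 4
  · rw [if_pos (show 4 + i + 3 < n by omega), if_pos h]
    have h1 : (4 + i).toNat = 4 + i.toNat := by omega
    have h2 : (4 + i + 3) = 4 + (i + 3) := by ring
    have h3 : (4 + (i + 3)).toNat = 4 + (i + 3).toNat := by omega
    rw [h2, h3, PySem.List.pyGetD_of_nonneg _ _ (by omega),
        PySem.List.pyGetD_of_nonneg _ _ (by omega), h1, h3,
        getD_four_cons, getD_four_cons, set_four_cons, set_four_cons,
        PySem.List.pyGetD_of_nonneg _ _ (by omega),
        PySem.List.pyGetD_of_nonneg _ _ (by omega)]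
  · rw [if_neg (show ¬ (4 + i + 3 < n) by omega), if_neg h]

lemma foldl_swapStep_shift (n : Int) (x0 x1 x2 x3 : Char) :
    ∀ (l : List Int) (rest : List Char), (∀ i ∈ l, 0 ≤ i) →
      l.foldl (fun lst i => swapStep n lst (4 + i)) (x0 :: x1 :: x2 :: x3 :: rest)
        = x0 :: x1 :: x2 :: x3 :: l.foldl (swapStep (n - 4)) rest := by
  intro l
  induction l with
  | nil => intro rest _; rfl
  | cons j t ih =>
      intro rest hl
      simp only [List.foldl_cons]
      rw [swapStep_shift n j (hl j (by simp)) x0 x1 x2 x3 rest]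
      exact ih _ (fun i hi => hl i (by simp [hi]))

-- A's result, on the list side
def aJoin (s : List Char) : List Char :=
  (((PySem.List.pyRange 0 (s.length : Int) 4).map
      (fun i => PySem.List.slice s (some i) (some (i + 4)))).foldl
    (fun acc group =>
      if group.length = 4 then
        acc ++ [(PySem.List.pyGet? group (-1)).toList
                  ++ PySem.List.slice group (some 1) (some 3)
                  ++ (PySem.List.pyGet? group 0).toList]
      else acc ++ [group]) []).flatten

-- B's result, on the list side
def bFold (s : List Char) : List Char :=
  (PySem.List.pyRange 0 (s.length : Int) 4).foldl (swapStep (s.length : Int)) s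

lemma groups_cons (a b c d : Char) (rest : List Char) :
    (PySem.List.pyRange 0 ((a :: b :: c :: d :: rest).length : Int) 4).map
        (fun i => PySem.List.slice (a :: b :: c :: d :: rest) (some i) (some (i + 4)))
      = [a, b, c, d] :: (PySem.List.pyRange 0 ((rest.length : Int)) 4).map
        (fun i => PySem.List.slice rest (some i) (some (i + 4))) := by
  have hn : (0:Int) < ((a :: b :: c :: d :: rest).length : Int) := by
    simp; omega
  rw [pyRange_four_cons 0 _ hn, List.map_cons]
  congr 1
  have h4 : ((a :: b :: c :: d :: rest).length : Int) - 4 = (rest.length : Int) := by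
    simp; omega
  rw [show (0:Int) + 4 = 4 from by ring, pyRange_four_shift, h4, List.map_map]
  apply List.map_congr_left
  intro j hj
  have hj0 : 0 ≤ j := by
    rcases (PySem.List.mem_pyRange_iff_of_pos (by norm_num) j).mp hj with ⟨h1, _, _⟩
    exact h1
  simp only [Function.comp]
  rw [PySem.List.slice_toNat _ (by omega) (by omega),
      PySem.List.slice_toNat _ (by omega) (by omega)]
  have h1 : (4 + j).toNat = 4 + j.toNat := by omega
  have h2 : (4 + j + 4).toNat = 4 + (j + 4).toNat := by omega
  rw [h1, h2]
  have hdrop : List.drop (4 + j.toNat) (a :: b :: c :: d :: rest) = List.drop j.toNat rest := by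
    rw [← List.drop_drop]
    rfl
  rw [hdrop]
  congr 1
  omega

lemma foldl_body_eq (l : List (List Char)) (acc : List (List Char)) :
    l.foldl (fun acc group =>
        if group.length = 4 then
          acc ++ [(PySem.List.pyGet? group (-1)).toList
                    ++ PySem.List.slice group (some 1) (some 3)
                    ++ (PySem.List.pyGet? group 0).toList]
        else acc ++ [group]) acc
      = acc ++ l.map (fun group =>
          if group.length = 4 then
            (PySem.List.pyGet? group (-1)).toList
              ++ PySem.List.slice group (some 1) (some 3)
              ++ (PySem.List.pyGet? group 0).toList
          else group) := by
  induction l generalizing acc with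
  | nil => simp
  | cons g t ih =>
      simp only [List.foldl_cons, List.map_cons]
      rw [ih]
      split_ifs <;> simp

lemma aJoin_eq_core (s : List Char) : aJoin s = swapCore s := by
  match s with
  | [] => decide
  | [a] =>
      simp only [aJoin, swapCore]
      rw [show ((([a] : List Char).length : Int)) = 1 from by simp,
          show PySem.List.pyRange 0 1 4 = [0] from by decide]
      simp [PySem.List.slice, PySem.List.clampIdx, List.foldl, PySem.List.pyGet?,
        PySem.List.pyIdx?]
  | [a, b] =>
      simp only [aJoin, swapCore]
      rw [show ((([a, b] : List Char).length : Int)) = 2 from by simp,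
          show PySem.List.pyRange 0 2 4 = [0] from by decide]
      simp [PySem.List.slice, PySem.List.clampIdx, List.foldl, PySem.List.pyGet?,
        PySem.List.pyIdx?]
  | [a, b, c] =>
      simp only [aJoin, swapCore]
      rw [show ((([a, b, c] : List Char).length : Int)) = 3 from by simp,
          show PySem.List.pyRange 0 3 4 = [0] from by decide]
      simp [PySem.List.slice, PySem.List.clampIdx, List.foldl, PySem.List.pyGet?,
        PySem.List.pyIdx?]
  | a :: b :: c :: d :: rest =>
      have ih := aJoin_eq_core rest
      simp only [aJoin] at ih ⊢
      rw [groups_cons, foldl_body_eq, List.map_cons]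
      rw [foldl_body_eq _ [] ] at ih
      simp only [List.nil_append] at ih ⊢
      rw [List.flatten_cons, ih]
      have hsw : (if ([a, b, c, d] : List Char).length = 4 then
            (PySem.List.pyGet? ([a, b, c, d] : List Char) (-1)).toList
              ++ PySem.List.slice ([a, b, c, d] : List Char) (some 1) (some 3)
              ++ (PySem.List.pyGet? ([a, b, c, d] : List Char) 0).toList
          else [a, b, c, d]) = [d, b, c, a] := by
        rw [if_pos (by simp)]
        rw [PySem.List.slice_toNat _ (by norm_num) (by norm_num)]
        simp [PySem.List.pyGet?, PySem.List.pyIdx?, List.take, List.drop]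
      rw [hsw]
      simp [swapCore]

lemma bFold_eq_core (s : List Char) : bFold s = swapCore s := by
  match s with
  | [] => decide
  | [a] =>
      simp only [bFold, swapCore]
      rw [show ((([a] : List Char).length : Int)) = 1 from by simp,
          show PySem.List.pyRange 0 1 4 = [0] from by decide]
      simp [swapStep]
  | [a, b] =>
      simp only [bFold, swapCore]
      rw [show ((([a, b] : List Char).length : Int)) = 2 from by simp,
          show PySem.List.pyRange 0 2 4 = [0] from by decide]
      simp [swapStep]
  | [a, b, c] =>
      simp only [bFold, swapCore]
      rw [show ((([a, b, c] : List Char).length : Int)) = 3 from by simp,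
          show PySem.List.pyRange 0 3 4 = [0] from by decide]
      simp [swapStep]
  | a :: b :: c :: d :: rest =>
      have ih := bFold_eq_core rest
      simp only [bFold] at ih ⊢
      set n : Int := ((a :: b :: c :: d :: rest).length : Int) with hn
      have hn4 : n = (rest.length : Int) + 4 := by
        rw [hn]; simp; omega
      have hpos : (0:Int) < n := by omega
      rw [pyRange_four_cons 0 n hpos, List.foldl_cons]
      have hstep0 : swapStep n (a :: b :: c :: d :: rest) 0 = d :: b :: c :: a :: rest := by
        unfold swapStep
        rw [if_pos (by omega)]
        rw [PySem.List.pyGetD_of_nonneg _ _ (by norm_num),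
            PySem.List.pyGetD_of_nonneg _ _ (by norm_num)]
        simp [List.set]
      rw [hstep0, show (0:Int) + 4 = 4 from by ring, pyRange_four_shift, List.foldl_map]
      rw [foldl_swapStep_shift n d b c a _ _ (fun i hi => by
        rcases (PySem.List.mem_pyRange_iff_of_pos (by norm_num) i).mp hi with ⟨h1, _, _⟩
        exact h1)]
      rw [show n - 4 = (rest.length : Int) from by omega]
      rw [ih]
      simp [swapCore]

-- ===== VERDICT (by name: the statement is the Claim_ definition above) =====
theorem swap_first_last_spec : Claim_equal_swap_first_last := by
  intro key _
  unfold Spec_swap_first_last swap_first_last swap_first_last_alt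
  have hA := aJoin_eq_core key.toList
  have hB := bFold_eq_core key.toList
  simp only [aJoin] at hA
  simp only [bFold] at hB
  simp only [PySem.Str.len_eq]
  rw [hA, hB]
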